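-- pv_equiv track=rewrite | github.com/MetGang/Advent-of-Code | 2021/02/p1.py | solve
-- ===== SOURCE A (Python) =====
-- def solve(data):
--     commands = data
--
--     position = 0
--     depth = 0
--
--     for cmd, value in commands:
--         match cmd:
--             case 'forward':
--                 position += value
--             case 'up':
--                 depth -= value
--             case 'down':
--                 depth += value
--
--     return position * depth
-- ===== SOURCE B (Python) =====
-- def solve(data):
--     data = list(data)
--     position = sum(v for c, v in data if c == 'forward')
--     total_down = sum(v for c, v in data if c == 'down')
--     total_up = sum(v for c, v in data if c == 'up')
--     return position * (total_down - total_up)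
-- ===== Notes on version B (the rewrite author's own statement) =====
-- stated objective: alternative
-- what changed: Replaced the single stateful loop with a match into three independent filtered sums (forward / down / up) combined at the end; depth = down - up.
import Mathlib
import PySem

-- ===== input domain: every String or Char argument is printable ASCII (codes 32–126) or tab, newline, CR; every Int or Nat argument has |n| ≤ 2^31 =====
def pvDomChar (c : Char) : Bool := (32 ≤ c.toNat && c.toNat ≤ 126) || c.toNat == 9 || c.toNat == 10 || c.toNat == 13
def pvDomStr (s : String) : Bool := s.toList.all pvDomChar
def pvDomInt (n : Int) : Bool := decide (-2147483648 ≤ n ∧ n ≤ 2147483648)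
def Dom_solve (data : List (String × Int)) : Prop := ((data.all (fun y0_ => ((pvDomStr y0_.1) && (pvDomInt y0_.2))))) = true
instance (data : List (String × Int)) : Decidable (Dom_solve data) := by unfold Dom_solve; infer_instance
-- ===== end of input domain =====

-- B replaces A's single stateful match-loop by three independent filtered sums; alternative decomposition, same cost.

-- ===== PORT A =====
-- one loop over (cmd, value), matching cmd and updating (position, depth)
def solve (data : List (String × Int)) : Int :=
  let st := data.foldl (fun (pd : Int × Int) cv =>
    let (position, depth) := pd
    let (cmd, value) := cv
    if cmd = "forward" then (position + value, depth)
    else if cmd = "up" then (position, depth - value)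
    else if cmd = "down" then (position, depth + value)
    else (position, depth)) (0, 0)
  st.1 * st.2

-- ===== PORT B =====
-- three filtered sums, combined at the end
def solve_alt (data : List (String × Int)) : Int :=
  let position := ((data.filter (fun cv => cv.1 = "forward")).map (fun cv => cv.2)).sum
  let total_down := ((data.filter (fun cv => cv.1 = "down")).map (fun cv => cv.2)).sum
  let total_up := ((data.filter (fun cv => cv.1 = "up")).map (fun cv => cv.2)).sum
  position * (total_down - total_up)

-- ===== PRECONDITION & SPEC =====
def Spec_solve (data : List (String × Int)) (out : Int) : Prop := out = solve_alt data
instance (data : List (String × Int)) (out : Int) : Decidable (Spec_solve data out) := by unfold Spec_solve; infer_instance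

-- ===== CLAIM (what is proved, stated in full; the proofs are below) =====
def Claim_equal_solve : Prop := ∀ (data : List (String × Int)), Dom_solve data → Spec_solve data (solve data)

-- ===== LEMMAS AND PROOFS =====

def sumIf (s : String) (data : List (String × Int)) : Int :=
  ((data.filter (fun cv => cv.1 = s)).map (fun cv => cv.2)).sum

lemma solve_fold_eq (data : List (String × Int)) (p d : Int) :
    (data.foldl (fun (pd : Int × Int) cv =>
      let (position, depth) := pd
      let (cmd, value) := cv
      if cmd = "forward" then (position + value, depth)
      else if cmd = "up" then (position, depth - value)
      else if cmd = "down" then (position, depth + value)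
      else (position, depth)) (p, d)) =
    (p + sumIf "forward" data, d + sumIf "down" data - sumIf "up" data) := by
  induction data generalizing p d with
  | nil => simp [sumIf]
  | cons hd tl ih =>
    obtain ⟨c, v⟩ := hd
    simp only [List.foldl_cons]
    by_cases h1 : c = "forward"
    · simp [h1, ih, sumIf]; ring_nf
    · by_cases h2 : c = "up"
      · simp [h2, ih, sumIf]; ring
      · by_cases h3 : c = "down"
        · simp [h3, ih, sumIf]; ring
        · simp [h1, h2, h3, ih, sumIf]

-- ===== VERDICT (by name: the statement is the Claim_ definition above) =====
theorem solve_spec : Claim_equal_solve := by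
  intro data _
  show solve data = solve_alt data
  simp [solve, solve_alt, solve_fold_eq, sumIf]
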